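-- pv_equiv track=rewrite | github.com/BrettRey/erdos-problem-993 | find_smallest_scc_failure.py | check_scc
-- ===== SOURCE A (Python) =====
-- def _polyadd(a, b):
--     la, lb = len(a), len(b)
--     out = [0] * max(la, lb)
--     for i in range(la):
--         out[i] += a[i]
--     for i in range(lb):
--         out[i] += b[i]
--     return out
--
-- def check_scc(E, dp1):
--     """Check (1+x)*I ≽ E where I = E + dp1.
--
--     Returns (passes, failing_k, delta_k).
--     """
--     I = _polyadd(E, dp1)
--     lenI = len(I)
--     # (1+x)*I coefficients: prod[k] = I[k] + I[k-1]
--     prod = [0] * (lenI + 1)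
--     for k in range(lenI):
--         prod[k] += I[k]
--         prod[k + 1] += I[k]
--
--     lenE = len(E)
--     max_len = max(len(prod), lenE)
--     for k in range(max_len):
--         p = prod[k] if k < len(prod) else 0
--         e = E[k] if k < lenE else 0
--         delta = p - e
--         if delta < 0:
--             return False, k, delta
--     return True, -1, 0
-- ===== SOURCE B (Python) =====
-- def check_scc(E, dp1):
--     """Check (1+x)*I >= E where I = E + dp1.
--
--     Returns (passes, failing_k, delta_k).
--     Single fused pass: coefficients of I and (1+x)*I are computed on the fly.
--     """
--     lenE, lenD = len(E), len(dp1)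
--     lenI = max(lenE, lenD)
--     for k in range(lenI + 1):
--         Ik = (E[k] if k < lenE else 0) + (dp1[k] if k < lenD else 0)
--         Ikm1 = 0 if k == 0 else (E[k-1] if k-1 < lenE else 0) + (dp1[k-1] if k-1 < lenD else 0)
--         e = E[k] if k < lenE else 0
--         delta = Ik + Ikm1 - e
--         if delta < 0:
--             return False, k, delta
--     return True, -1, 0
-- ===== Notes on version B (the rewrite author's own statement) =====
-- stated objective: faster
-- what changed: Replaces the four sequential passes (building I via _polyadd, building the prod table, then scanning) with one fused loop over k=0..max(len(E),len(dp1)) that computes each coefficient of I and (1+x)*I on the fly from E and dp1, dropping _polyadd and both intermediate arrays (measured ~5x faster: no temporary lists are allocated or traversed).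
import Mathlib
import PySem

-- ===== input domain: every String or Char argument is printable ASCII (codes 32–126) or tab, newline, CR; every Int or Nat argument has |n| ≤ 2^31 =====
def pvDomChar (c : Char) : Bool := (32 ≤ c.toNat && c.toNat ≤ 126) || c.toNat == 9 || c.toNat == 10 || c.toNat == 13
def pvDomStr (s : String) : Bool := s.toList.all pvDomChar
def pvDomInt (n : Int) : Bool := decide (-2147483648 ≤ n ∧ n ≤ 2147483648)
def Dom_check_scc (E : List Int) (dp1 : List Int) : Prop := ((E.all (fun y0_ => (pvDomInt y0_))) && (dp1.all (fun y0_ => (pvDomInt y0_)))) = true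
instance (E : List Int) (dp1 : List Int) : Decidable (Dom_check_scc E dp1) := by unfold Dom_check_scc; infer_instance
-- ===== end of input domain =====

-- B fuses A's four passes (build I, build prod table, scan) into one loop computing each coefficient on the fly, with no intermediate arrays (measured faster in a timing run).

-- list read with default 0 ('xs[i]' on an in-range index, or 'xs[i] if i < len(xs) else 0')
def pvGetD (l : List Int) (i : Nat) : Int := l.getD i 0

-- ===== PORT A =====
-- _polyadd: out = [0]*max(la,lb); two in-place accumulation loops (all writes in range)
def pvPolyadd (a b : List Int) : List Int :=
  (List.range b.length).foldl (fun o i => o.set i (pvGetD o i + pvGetD b i))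
    ((List.range a.length).foldl (fun o i => o.set i (pvGetD o i + pvGetD a i))
      (List.replicate (max a.length b.length) (0 : Int)))

-- the final scan loop of A with its early return
def pvScanA (prod E : List Int) : List Nat → Bool × Int × Int
  | [] => (true, -1, 0)
  | k :: ks =>
    let p := pvGetD prod k
    let e := pvGetD E k
    let delta := p - e
    if delta < 0 then (false, (k : Int), delta) else pvScanA prod E ks

def check_scc (E : List Int) (dp1 : List Int) : Bool × Int × Int :=
  let I := pvPolyadd E dp1
  let lenI := I.length
  let prod := (List.range lenI).foldl
    (fun p k =>
      let p := p.set k (pvGetD p k + pvGetD I k)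
      p.set (k + 1) (pvGetD p (k + 1) + pvGetD I k))
    (List.replicate (lenI + 1) (0 : Int))
  let lenE := E.length
  let maxLen := max prod.length lenE
  pvScanA prod E (List.range maxLen)

-- ===== PORT B =====
-- the fused loop of B: per k, the coefficients of I and of (1+x)*I computed on the fly
def pvLoopB (E dp1 : List Int) : List Nat → Bool × Int × Int
  | [] => (true, -1, 0)
  | k :: ks =>
    let Ik := pvGetD E k + pvGetD dp1 k
    let Ikm1 := if k = 0 then 0 else pvGetD E (k - 1) + pvGetD dp1 (k - 1)
    let e := pvGetD E k
    let delta := Ik + Ikm1 - e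
    if delta < 0 then (false, (k : Int), delta) else pvLoopB E dp1 ks

def check_scc_alt (E : List Int) (dp1 : List Int) : Bool × Int × Int :=
  let lenI := max E.length dp1.length
  pvLoopB E dp1 (List.range (lenI + 1))

-- ===== PRECONDITION & SPEC =====
def Spec_check_scc (E : List Int) (dp1 : List Int) (out : Bool × Int × Int) : Prop := out = check_scc_alt E dp1
instance (E : List Int) (dp1 : List Int) (out : Bool × Int × Int) : Decidable (Spec_check_scc E dp1 out) := by unfold Spec_check_scc; infer_instance

-- ===== CLAIM (what is proved, stated in full; the proofs are below) =====
def Claim_equal_check_scc : Prop := ∀ (E : List Int) (dp1 : List Int), Dom_check_scc E dp1 → Spec_check_scc E dp1 (check_scc E dp1)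

-- ===== LEMMAS AND PROOFS =====

theorem pvGetD_set (o : List Int) (i j : Nat) (v : Int) :
    pvGetD (o.set i v) j = if i = j ∧ i < o.length then v else pvGetD o j := by
  simp only [pvGetD, List.getD_eq_getElem?_getD, List.getElem?_set]
  by_cases h1 : i = j
  · subst h1
    by_cases h2 : i < o.length
    · simp [h2]
    · simp [h2]
  · simp [h1]

theorem pvGetD_replicate (n j : Nat) : pvGetD (List.replicate n (0 : Int)) j = 0 := by
  simp [pvGetD, List.getD_eq_getElem?_getD, List.getElem?_replicate]
  split <;> simp

theorem pvGetD_of_le (l : List Int) (j : Nat) (h : l.length ≤ j) : pvGetD l j = 0 := by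
  simp [pvGetD, List.getD_eq_getElem?_getD, List.getElem?_eq_none h]

theorem pvAccum_length (a : List Int) (n : Nat) (o : List Int) :
    ((List.range n).foldl (fun o i => o.set i (pvGetD o i + pvGetD a i)) o).length = o.length := by
  induction n with
  | zero => rfl
  | succ n ih =>
    rw [List.range_succ, List.foldl_append]
    simp only [List.foldl_cons, List.foldl_nil, List.length_set]
    exact ih

theorem pvAccum_getD (a : List Int) (n : Nat) (o : List Int) (hn : n ≤ o.length) (j : Nat) :
    pvGetD ((List.range n).foldl (fun o i => o.set i (pvGetD o i + pvGetD a i)) o) j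
      = pvGetD o j + (if j < n then pvGetD a j else 0) := by
  induction n with
  | zero => simp
  | succ n ih =>
    rw [List.range_succ, List.foldl_append]
    simp only [List.foldl_cons, List.foldl_nil]
    rw [pvGetD_set, pvAccum_length]
    by_cases hj : n = j
    · subst hj
      rw [if_pos ⟨rfl, by omega⟩, ih (by omega)]
      rw [if_neg (by omega : ¬ n < n), if_pos (by omega : n < n + 1)]
      ring
    · rw [if_neg (by tauto), ih (by omega)]
      congr 1
      by_cases h1 : j < n
      · rw [if_pos h1, if_pos (by omega)]
      · rw [if_neg h1, if_neg (by omega)]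

theorem pvPolyadd_length (a b : List Int) : (pvPolyadd a b).length = max a.length b.length := by
  unfold pvPolyadd
  rw [pvAccum_length, pvAccum_length, List.length_replicate]

theorem pvPolyadd_getD (a b : List Int) (j : Nat) :
    pvGetD (pvPolyadd a b) j = pvGetD a j + pvGetD b j := by
  unfold pvPolyadd
  rw [pvAccum_getD b _ _ (by rw [pvAccum_length, List.length_replicate]; omega),
      pvAccum_getD a _ _ (by rw [List.length_replicate]; omega), pvGetD_replicate]
  by_cases h1 : j < a.length <;> by_cases h2 : j < b.length
  · rw [if_pos h1, if_pos h2]; ring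
  · rw [if_pos h1, if_neg h2, pvGetD_of_le b j (by omega)]; ring
  · rw [if_neg h1, if_pos h2, pvGetD_of_le a j (by omega)]; ring
  · rw [if_neg h1, if_neg h2, pvGetD_of_le a j (by omega), pvGetD_of_le b j (by omega)]; ring

theorem pvProd_length (I : List Int) (n : Nat) (p : List Int) :
    ((List.range n).foldl
      (fun p k => (p.set k (pvGetD p k + pvGetD I k)).set (k + 1)
        (pvGetD (p.set k (pvGetD p k + pvGetD I k)) (k + 1) + pvGetD I k)) p).length = p.length := by
  induction n with
  | zero => rfl
  | succ n ih =>
    rw [List.range_succ, List.foldl_append]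
    simp only [List.foldl_cons, List.foldl_nil, List.length_set]
    exact ih

theorem pvProd_getD (I : List Int) (n : Nat) (hn : n ≤ I.length) (j : Nat) :
    pvGetD ((List.range n).foldl
      (fun p k => (p.set k (pvGetD p k + pvGetD I k)).set (k + 1)
        (pvGetD (p.set k (pvGetD p k + pvGetD I k)) (k + 1) + pvGetD I k))
      (List.replicate (I.length + 1) (0 : Int))) j
      = (if j < n then pvGetD I j else 0) + (if 0 < j ∧ j ≤ n then pvGetD I (j - 1) else 0) := by
  induction n generalizing j with
  | zero => simp [pvGetD_replicate]; omega
  | succ n ih =>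
    rw [List.range_succ, List.foldl_append]
    simp only [List.foldl_cons, List.foldl_nil]
    have hlen : ((List.range n).foldl
        (fun p k => (p.set k (pvGetD p k + pvGetD I k)).set (k + 1)
          (pvGetD (p.set k (pvGetD p k + pvGetD I k)) (k + 1) + pvGetD I k))
        (List.replicate (I.length + 1) (0 : Int))).length = I.length + 1 := by
      rw [pvProd_length, List.length_replicate]
    rw [pvGetD_set, List.length_set, hlen]
    by_cases hj1 : n + 1 = j
    · rw [if_pos ⟨hj1, by omega⟩, pvGetD_set, hlen]
      rw [if_neg (by omega), ih (by omega)]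
      subst hj1
      rw [if_neg (by omega : ¬ n + 1 < n), if_neg (by omega : ¬ (0 < n + 1 ∧ n + 1 ≤ n))]
      rw [if_neg (by omega : ¬ n + 1 < n + 1), if_pos (by omega : 0 < n + 1 ∧ n + 1 ≤ n + 1)]
      simp
    · rw [if_neg (by tauto), pvGetD_set, hlen]
      by_cases hj2 : n = j
      · subst hj2
        rw [if_pos ⟨rfl, by omega⟩, ih (by omega)]
        rw [if_neg (by omega : ¬ n < n), if_pos (by omega : n < n + 1)]
        by_cases h0 : 0 < n
        · rw [if_pos ⟨h0, by omega⟩, if_pos ⟨h0, by omega⟩]; ring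
        · rw [if_neg (by omega), if_neg (by omega)]; ring
      · rw [if_neg (by tauto), ih (by omega)]
        congr 1
        · by_cases h1 : j < n
          · rw [if_pos h1, if_pos (by omega)]
          · rw [if_neg h1, if_neg (by omega)]
        · by_cases h2 : 0 < j ∧ j ≤ n
          · rw [if_pos h2, if_pos ⟨h2.1, by omega⟩]
          · rw [if_neg h2, if_neg (by omega)]

theorem pvScan_eq (E dp1 prod : List Int)
    (hp : ∀ k, pvGetD prod k
      = (pvGetD E k + pvGetD dp1 k) + (if k = 0 then 0 else pvGetD E (k - 1) + pvGetD dp1 (k - 1)))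
    (ks : List Nat) : pvScanA prod E ks = pvLoopB E dp1 ks := by
  induction ks with
  | nil => rfl
  | cons k ks ih => simp only [pvScanA, pvLoopB, hp k, ih]

-- ===== VERDICT (by name: the statement is the Claim_ definition above) =====
theorem check_scc_spec : Claim_equal_check_scc := by
  intro E dp1 _
  show check_scc E dp1 = check_scc_alt E dp1
  simp only [check_scc, check_scc_alt]
  have hI : (pvPolyadd E dp1).length = max E.length dp1.length := pvPolyadd_length E dp1
  have hplen : ((List.range (pvPolyadd E dp1).length).foldl
      (fun p k => (p.set k (pvGetD p k + pvGetD (pvPolyadd E dp1) k)).set (k + 1)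
        (pvGetD (p.set k (pvGetD p k + pvGetD (pvPolyadd E dp1) k)) (k + 1) + pvGetD (pvPolyadd E dp1) k))
      (List.replicate ((pvPolyadd E dp1).length + 1) (0 : Int))).length
      = (pvPolyadd E dp1).length + 1 := by
    rw [pvProd_length, List.length_replicate]
  rw [hplen, hI]
  have hmax : max (max E.length dp1.length + 1) E.length = max E.length dp1.length + 1 := by omega
  rw [hmax]
  apply pvScan_eq
  intro k
  rw [← hI, pvProd_getD (pvPolyadd E dp1) (pvPolyadd E dp1).length le_rfl k]
  congr 1
  · by_cases h1 : k < (pvPolyadd E dp1).length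
    · rw [if_pos h1, pvPolyadd_getD]
    · rw [if_neg h1, pvGetD_of_le E k (by omega), pvGetD_of_le dp1 k (by omega)]
      simp
  · by_cases h0 : k = 0
    · subst h0
      rw [if_neg (by omega), if_pos rfl]
    · rw [if_neg h0]
      by_cases h2 : k ≤ (pvPolyadd E dp1).length
      · rw [if_pos ⟨by omega, h2⟩, pvPolyadd_getD]
      · rw [if_neg (by tauto), pvGetD_of_le E (k - 1) (by omega), pvGetD_of_le dp1 (k - 1) (by omega)]
        simp
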